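-- pv_equiv track=rewrite | github.com/olsenw/LeetCodeExercises | Python3/maximum_sum_of_distinct_subarrays_with_length_k.py | maximumSubarraySum_tle
-- ===== SOURCE A (Python) =====
-- from typing import Counter, List, Dict, Set, Optional
--
-- def maximumSubarraySum_tle(nums: List[int], k: int) -> int:
--     answer = 0
--     c = Counter(nums[:k-1])
--     s = sum(nums[:k-1])
--     for i in range(k-1, len(nums)):
--         c[nums[i]] += 1
--         s += nums[i]
--         if c.most_common(1)[0][1] == 1:
--             answer = max(answer, s)
--         c[nums[i-k+1]] -= 1
--         s -= nums[i-k+1]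
--     return answer
-- ===== SOURCE B (Python) =====
-- def maximumSubarraySum_tle(nums, k):
--     n = len(nums)
--     if k <= 0 or k > n:
--         return 0
--     count = {}
--     dups = 0  # number of distinct values occurring >= 2 times in the window
--     s = 0
--     best = 0
--     for i, x in enumerate(nums):
--         c = count.get(x, 0)
--         if c == 1:
--             dups += 1
--         count[x] = c + 1
--         s += x
--         if i >= k:
--             y = nums[i - k]
--             cy = count[y]
--             if cy == 2:
--                 dups -= 1
--             count[y] = cy - 1
--             s -= y
--         if i >= k - 1 and dups == 0:
--             best = max(best, s)
--     return best
-- ===== Notes on version B (the rewrite author's own statement) =====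
-- stated objective: faster
-- what changed: Replaces the per-step Counter.most_common(1) scan over all distinct values with an O(1) incrementally maintained counter 'dups' of values duplicated in the window, making one linear sliding-window pass.
import Mathlib
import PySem

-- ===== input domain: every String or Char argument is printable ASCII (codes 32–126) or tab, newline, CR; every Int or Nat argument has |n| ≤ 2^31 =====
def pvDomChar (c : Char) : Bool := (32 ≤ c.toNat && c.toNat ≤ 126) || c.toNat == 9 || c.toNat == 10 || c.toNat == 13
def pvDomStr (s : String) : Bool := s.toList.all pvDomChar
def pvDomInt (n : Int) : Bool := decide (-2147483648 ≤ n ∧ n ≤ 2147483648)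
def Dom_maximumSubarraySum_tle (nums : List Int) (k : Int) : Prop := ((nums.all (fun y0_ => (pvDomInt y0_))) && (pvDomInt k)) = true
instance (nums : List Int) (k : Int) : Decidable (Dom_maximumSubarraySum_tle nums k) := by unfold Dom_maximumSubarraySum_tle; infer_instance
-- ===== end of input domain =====

-- B replaces A's per-step Counter.most_common(1) scan by an incrementally maintained
-- count of duplicated window values (one sliding-window pass); return values proved equal for k ≥ 1.


-- ===== PORT A =====
-- c.most_common(1)[0][1]: the count field of the most-common item, i.e. the maximum of the
-- counter's values (ties all carry that same maximal count, so only the max matters);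
-- Python raises IndexError on an empty counter — unreachable here for k ≥ 1 — mapped to 0.
def pvMaxCount (c : PySem.Dict Int Int) : Int :=
  match c.values with
  | [] => 0
  | v :: t => t.foldl max v

def maximumSubarraySum_tle (nums : List Int) (k : Int) : Int :=
  let pre := PySem.List.slice nums none (some (k - 1))   -- nums[:k-1]
  ((PySem.List.pyRange (k - 1) (nums.length : Int) 1).foldl
    (fun (st : Int × PySem.Dict Int Int × Int) i =>
      let c1 := st.2.1.modify (PySem.List.pyGetD nums i 0) 0 (· + 1)   -- c[nums[i]] += 1
      let s1 := st.2.2 + PySem.List.pyGetD nums i 0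
      let a1 := if pvMaxCount c1 = 1 then max st.1 s1 else st.1
      (a1, c1.modify (PySem.List.pyGetD nums (i - k + 1) 0) 0 (· - 1),  -- c[nums[i-k+1]] -= 1
       s1 - PySem.List.pyGetD nums (i - k + 1) 0))
    (0, PySem.Dict.counter pre, pre.sum)).1

-- ===== PORT B =====
def maximumSubarraySum_tle_alt (nums : List Int) (k : Int) : Int :=
  if k ≤ 0 ∨ (nums.length : Int) < k then 0
  else
    ((PySem.List.enumerate nums 0).foldl
      (fun (st : PySem.Dict Int Int × Int × Int × Int) ix =>
        let i := ix.1
        let x := ix.2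
        let cx := st.1.getD x 0                                    -- count.get(x, 0)
        let dups := if cx = 1 then st.2.1 + 1 else st.2.1
        let count := st.1.insert x (cx + 1)
        let s := st.2.2.1 + x
        let rem : PySem.Dict Int Int × Int × Int :=
          if k ≤ i then
            let y := PySem.List.pyGetD nums (i - k) 0              -- nums[i-k]; 0 ≤ i-k < len
            let cy := count.getD y 0                               -- count[y]; y is in the window so the key exists
            (count.insert y (cy - 1), (if cy = 2 then dups - 1 else dups), s - y)
          else (count, dups, s)
        let best := if k - 1 ≤ i ∧ rem.2.1 = 0 then max st.2.2.2 rem.2.2 else st.2.2.2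
        (rem.1, rem.2.1, rem.2.2, best))
      (PySem.Dict.empty, 0, 0, 0)).2.2.2

-- ===== PRECONDITION & SPEC =====
-- Pre_ excludes exactly k ≤ 0: there A always raises IndexError (its loop starts at the
-- negative index k-1 and, on a nonempty list, reads nums[len-k] past the end), so A returns
-- on precisely the inputs with k ≥ 1.
def Pre_maximumSubarraySum_tle (nums : List Int) (k : Int) : Prop := 1 ≤ k
instance (nums : List Int) (k : Int) : Decidable (Pre_maximumSubarraySum_tle nums k) := by
  unfold Pre_maximumSubarraySum_tle; infer_instance

def pvWitness_maximumSubarraySum_tle : List Int × Int := ([1, 2, 3], 2)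

def Spec_maximumSubarraySum_tle (nums : List Int) (k : Int) (out : Int) : Prop := out = maximumSubarraySum_tle_alt nums k
instance (nums : List Int) (k : Int) (out : Int) : Decidable (Spec_maximumSubarraySum_tle nums k out) := by unfold Spec_maximumSubarraySum_tle; infer_instance

-- ===== CLAIM (what is proved, stated in full; the proofs are below) =====
def Claim_equal_maximumSubarraySum_tle : Prop := ∀ (nums : List Int) (k : Int), Dom_maximumSubarraySum_tle nums k → Pre_maximumSubarraySum_tle nums k → Spec_maximumSubarraySum_tle nums k (maximumSubarraySum_tle nums k)
-- ===== LEMMAS AND PROOFS =====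

-- the window of length K starting at j, and the reference fold both loops compute
def pvWin (nums : List Int) (K j : Nat) : List Int := (nums.drop j).take K
def pvRef (nums : List Int) (K M : Nat) : Int :=
  (List.range M).foldl (fun ans j =>
    if (pvWin nums K j).Nodup then max ans (pvWin nums K j).sum else ans) 0

lemma pvRef_succ (nums : List Int) (K M : Nat) :
    pvRef nums K (M + 1) =
      if (pvWin nums K M).Nodup then max (pvRef nums K M) (pvWin nums K M).sum
      else pvRef nums K M := by
  simp [pvRef, List.range_succ]


lemma pvCountP_update {S : List Int} (hnd : S.Nodup) {x : Int} (hx : x ∈ S)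
    (p q : Int → Bool) (h : ∀ y ∈ S, y ≠ x → p y = q y) :
    S.countP q + (if p x = true then 1 else 0) = S.countP p + (if q x = true then 1 else 0) := by
  induction S with
  | nil => cases hx
  | cons a S ih =>
    rw [List.nodup_cons] at hnd
    rcases List.mem_cons.mp hx with rfl | hxS
    · have hpq : ∀ y ∈ S, p y = q y := fun y hy =>
        h y (List.mem_cons_of_mem _ hy) (fun hEq => hnd.1 (hEq ▸ hy))
      have : S.countP p = S.countP q := List.countP_congr (fun y hy => by rw [hpq y hy])
      simp only [List.countP_cons, this]
      omega
    · have hax : a ≠ x := fun hEq => hnd.1 (hEq ▸ hxS)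
      have hpa : p a = q a := h a List.mem_cons_self hax
      have := ih hnd.2 hxS (fun y hy hyx => h y (List.mem_cons_of_mem _ hy) hyx)
      simp only [List.countP_cons, hpa]
      omega

lemma pvCountP_zero {S w : List Int} (hmem : ∀ v ∈ w, v ∈ S) :
    (S.countP (fun v => decide (2 ≤ w.count v)) = 0) ↔ w.Nodup := by
  rw [List.countP_eq_zero, List.nodup_iff_count_le_one]
  constructor
  · intro h a
    by_cases ha : a ∈ w
    · have := h a (hmem a ha); simp at this; omega
    · have : w.count a = 0 := List.count_eq_zero.mpr ha
      omega
  · intro h a _; simpa using Nat.not_lt.mpr (h a)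

lemma pvMaxCount_eq_one {c : PySem.Dict Int Int} {w : List Int}
    (hnd : c.keys.Nodup)
    (hcnt : ∀ v : Int, c.getD v 0 = (w.count v : Int))
    (hmem : ∀ x ∈ w, c.contains x = true)
    (hne : w ≠ []) :
    (pvMaxCount c = 1) ↔ w.Nodup := by
  -- every value of c is the count of some element
  have hvals : ∀ u ∈ c.values, ∃ z : Int, (w.count z : Int) = u := by
    intro u hu
    simp only [PySem.Dict.values, List.mem_map] at hu
    obtain ⟨⟨z, v⟩, hzv, hv⟩ := hu
    exact ⟨z, by rw [← hcnt z, PySem.Dict.getD_of_mem_items c hzv hnd 0]; exact hv⟩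
  -- the count of any element of w appears among the values
  have hcontval : ∀ z ∈ w, (w.count z : Int) ∈ c.values := by
    intro z hz
    have h1 : (c.get? z).isSome := by rw [← PySem.Dict.contains_eq_isSome_get?]; exact hmem z hz
    obtain ⟨u, hu⟩ := Option.isSome_iff_exists.mp h1
    have h2 : c.getD z 0 = u := PySem.Dict.getD_of_get?_eq_some c 0 hu
    have h3 : (z, u) ∈ c.items := PySem.Dict.mem_items_of_get?_eq_some c hu
    have h4 : u ∈ c.values := by
      simp only [PySem.Dict.values, List.mem_map]; exact ⟨(z, u), h3, rfl⟩
    have h5 : (w.count z : Int) = u := by rw [← hcnt z, h2]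
    rw [h5]; exact h4
  obtain ⟨z0, hz0⟩ := List.exists_mem_of_ne_nil w hne
  have hz0v := hcontval z0 hz0
  obtain ⟨v, t, hvt⟩ : ∃ v t, c.values = v :: t := by
    cases hc : c.values with
    | nil => rw [hc] at hz0v; cases hz0v
    | cons v t => exact ⟨v, t, rfl⟩
  have hmax : pvMaxCount c = t.foldl max v := by simp [pvMaxCount, hvt]
  have hub : ∀ u ∈ c.values, u ≤ t.foldl max v := by
    intro u hu; rw [hvt] at hu
    rcases List.mem_cons.mp hu with rfl | hu
    · exact (PySem.List.le_foldl_max t u).1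
    · exact (PySem.List.le_foldl_max t v).2 u hu
  have hmem' : t.foldl max v ∈ c.values := by
    rcases PySem.List.foldl_max_mem t v with h | h
    · rw [hvt, h]; exact List.mem_cons_self
    · rw [hvt]; exact List.mem_cons_of_mem _ h
  rw [hmax, List.nodup_iff_count_le_one]
  constructor
  · intro h1 a
    by_cases ha : a ∈ w
    · have := hub _ (hcontval a ha); rw [h1] at this
      exact_mod_cast this
    · rw [List.count_eq_zero.mpr ha]; omega
  · intro hcount
    obtain ⟨z, hz⟩ := hvals _ hmem'
    have h1 : t.foldl max v ≤ 1 := by rw [← hz]; exact_mod_cast hcount z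
    have hzc : 1 ≤ w.count z0 := List.count_pos_iff.mpr hz0
    have h2 : (w.count z0 : Int) ≤ t.foldl max v := hub _ hz0v
    omega

lemma pvDedup_append (l : List Int) (x : Int) :
    PySem.List.dedup (l ++ [x]) =
      if x ∈ l then PySem.List.dedup l else PySem.List.dedup l ++ [x] := by
  have h1 : ∀ ys : List Int, PySem.List.dedup ys = List.foldl PySem.Set.add [] ys := by
    intro ys; rw [PySem.List.dedup_eq_ofList, PySem.Set.ofList_eq_foldl]
  rw [h1, List.foldl_append, ← h1]
  show PySem.Set.add (PySem.List.dedup l) x = _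
  have hadd : PySem.Set.add (PySem.List.dedup l) x =
      if (PySem.List.dedup l).contains x then PySem.List.dedup l
      else PySem.List.dedup l ++ [x] := rfl
  rw [hadd]
  by_cases hx : x ∈ l
  · rw [if_pos, if_pos hx]
    show (List.contains _ x) = true
    rw [List.contains_eq_mem]
    simpa [PySem.List.mem_dedup] using hx
  · rw [if_neg, if_neg hx]
    show ¬ (List.contains _ x) = true
    rw [List.contains_eq_mem]
    simpa [PySem.List.mem_dedup] using hx


-- A's loop body (zeta-expanded form of the port's lambda)
def pvStepA (nums : List Int) (k : Int) (st : Int × PySem.Dict Int Int × Int) (i : Int) :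
    Int × PySem.Dict Int Int × Int :=
  (if pvMaxCount (st.2.1.modify (PySem.List.pyGetD nums i 0) 0 (· + 1)) = 1 then
      max st.1 (st.2.2 + PySem.List.pyGetD nums i 0)
    else st.1,
   (st.2.1.modify (PySem.List.pyGetD nums i 0) 0 (· + 1)).modify
      (PySem.List.pyGetD nums (i - k + 1) 0) 0 (· - 1),
   st.2.2 + PySem.List.pyGetD nums i 0 - PySem.List.pyGetD nums (i - k + 1) 0)

lemma pvA_unfold (nums : List Int) (k : Int) :
    maximumSubarraySum_tle nums k =
      ((PySem.List.pyRange (k - 1) (nums.length : Int) 1).foldl (pvStepA nums k)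
        (0, PySem.Dict.counter (PySem.List.slice nums none (some (k - 1))),
         (PySem.List.slice nums none (some (k - 1))).sum)).1 := rfl

lemma pv_A_inv (nums : List Int) (k : Int) (K : Nat) (hK : (K : Int) = k) (hK1 : 1 ≤ K) :
    ∀ (m : Nat), m + K ≤ nums.length + 1 →
    ∃ c s,
      (List.range m).foldl (fun st (t : Nat) => pvStepA nums k st ((k - 1) + (t : Int)))
        (0, PySem.Dict.counter (nums.take (K - 1)), (nums.take (K - 1)).sum)
      = (pvRef nums K m, c, s)
      ∧ (∀ v : Int, c.getD v 0 = (((nums.drop m).take (K - 1)).count v : Int))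
      ∧ (∀ x ∈ (nums.drop m).take (K - 1), c.contains x = true)
      ∧ c.keys.Nodup
      ∧ s = ((nums.drop m).take (K - 1)).sum := by
  intro m
  induction m with
  | zero =>
    intro _
    refine ⟨PySem.Dict.counter (nums.take (K - 1)), (nums.take (K - 1)).sum, ?_, ?_, ?_, ?_, ?_⟩
    · simp [pvRef]
    · intro v; simp [PySem.Dict.getD_counter]
    · intro x hx
      rw [PySem.Dict.contains_counter, List.contains_eq_mem]
      simpa using hx
    · exact PySem.Dict.nodup_keys_counter _
    · simp
  | succ m ih =>
    intro hm
    obtain ⟨c, s, heq, hcnt, hcont, hnd, hsum⟩ := ih (by omega)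
    have hmKn : m + (K - 1) < nums.length := by omega
    have hmn : m < nums.length := by omega
    -- abbreviations
    set w' : List Int := (nums.drop m).take (K - 1) with hw'
    set w : List Int := (nums.drop m).take K with hwdef
    set w2 : List Int := (nums.drop (m + 1)).take (K - 1) with hw2
    set x : Int := nums[m + (K - 1)]'hmKn with hxdef
    set y : Int := nums[m]'hmn with hydef
    have hKsplit : K = (K - 1) + 1 := (Nat.sub_add_cancel hK1).symm
    have hsplit1 : w = w' ++ [x] := by
      rw [hwdef, hKsplit, List.take_succ]
      congr 1
      have h : (nums.drop m)[(K - 1)]? = some x := by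
        rw [List.getElem?_drop]
        exact List.getElem?_eq_getElem hmKn
      rw [h]; rfl
    have hsplit2 : w = y :: w2 := by
      rw [hwdef, List.drop_eq_getElem_cons hmn, hKsplit, List.take_succ_cons]
    have hx : PySem.List.pyGetD nums ((k - 1) + (m : Int)) 0 = x := by
      have h1 : (k - 1) + (m : Int) = ((m + (K - 1) : Nat) : Int) := by push_cast; omega
      rw [h1, PySem.List.pyGetD_natCast, List.getD_eq_getElem _ _ hmKn]
    have hy : PySem.List.pyGetD nums (((k - 1) + (m : Int)) - k + 1) 0 = y := by
      have h1 : ((k - 1) + (m : Int)) - k + 1 = ((m : Nat) : Int) := by omega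
      rw [h1, PySem.List.pyGetD_natCast, List.getD_eq_getElem _ _ hmn]
    -- counts across the two windows
    have hcw : ∀ v : Int, (w.count v : Int) = (w'.count v : Int) + (if v = x then 1 else 0) := by
      intro v
      by_cases hvx : v = x <;>
        simp [hsplit1, List.count_append, hvx, eq_comm]
    have hcw2 : ∀ v : Int, (w.count v : Int) = (w2.count v : Int) + (if v = y then 1 else 0) := by
      intro v
      by_cases hvy : v = y <;>
        simp [hsplit2, hvy, eq_comm]
    -- the counter after the increment
    have hc1 : ∀ v : Int, (c.modify x 0 (· + 1)).getD v 0 = (w.count v : Int) := by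
      intro v
      rw [PySem.Dict.getD_modify, hcw v]
      by_cases hvx : v = x <;> simp [hvx, hcnt]
    have hcont1 : ∀ z ∈ w, (c.modify x 0 (· + 1)).contains z = true := by
      intro z hz
      rw [PySem.Dict.contains_modify]
      rw [hsplit1] at hz
      rcases List.mem_append.mp hz with hz | hz
      · simp [hcont z hz]
      · simp at hz; simp [hz]
    have hnd1 : (c.modify x 0 (· + 1)).keys.Nodup := by
      rw [PySem.Dict.keys_modify]
      exact PySem.Dict.nodup_keys_insert _ _ _ hnd
    have hwne : w ≠ [] := by
      have : w.length = K := by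
        rw [hwdef, List.length_take, List.length_drop]; omega
      intro hnil; rw [hnil] at this; simp at this; omega
    have hcond : (pvMaxCount (c.modify x 0 (· + 1)) = 1) ↔ w.Nodup :=
      pvMaxCount_eq_one hnd1 hc1 hcont1 hwne
    have hs1 : s + x = w.sum := by
      rw [hsplit1, List.sum_append, hsum]; simp
    -- the counter after the decrement
    have hc2 : ∀ v : Int, ((c.modify x 0 (· + 1)).modify y 0 (· - 1)).getD v 0
        = (w2.count v : Int) := by
      intro v
      rw [PySem.Dict.getD_modify]
      by_cases hvy : v = y
      · rw [if_pos hvy, hc1 y]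
        show (w.count y : Int) - 1 = (w2.count v : Int)
        have h2 := hcw2 y
        rw [if_pos rfl] at h2
        rw [hvy]
        omega
      · rw [if_neg hvy, hc1 v]
        have h2 := hcw2 v
        rw [if_neg hvy] at h2
        omega
    have hcont2 : ∀ z ∈ w2, ((c.modify x 0 (· + 1)).modify y 0 (· - 1)).contains z = true := by
      intro z hz
      rw [PySem.Dict.contains_modify]
      have : z ∈ w := by rw [hsplit2]; exact List.mem_cons_of_mem _ hz
      simp [hcont1 z this]
    have hnd2 : ((c.modify x 0 (· + 1)).modify y 0 (· - 1)).keys.Nodup := by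
      rw [PySem.Dict.keys_modify]
      exact PySem.Dict.nodup_keys_insert _ _ _ hnd1
    have hs2 : s + x - y = w2.sum := by
      have : w.sum = y + w2.sum := by rw [hsplit2, List.sum_cons]
      omega
    refine ⟨(c.modify x 0 (· + 1)).modify y 0 (· - 1), s + x - y, ?_, hc2, hcont2, hnd2, hs2⟩
    rw [List.range_succ, List.foldl_append, heq]
    simp only [List.foldl_cons, List.foldl_nil, pvStepA, hx, hy]
    have hwin : pvWin nums K m = w := rfl
    rw [pvRef_succ, hwin]
    by_cases hN : w.Nodup
    · rw [if_pos hN, if_pos (hcond.mpr hN), hs1]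
    · rw [if_neg hN, if_neg (fun h => hN (hcond.mp h))]

theorem pv_A_eval (nums : List Int) (k : Int) (hk : 1 ≤ k) :
    maximumSubarraySum_tle nums k = pvRef nums k.toNat (nums.length + 1 - k.toNat) := by
  by_cases hkn : (nums.length : Int) < k
  · rw [pvA_unfold, PySem.List.pyRange_one_eq_nil (by omega : (nums.length : Int) ≤ k - 1)]
    have h0 : nums.length + 1 - k.toNat = 0 := by omega
    rw [h0]
    simp [pvRef]
  · have hK : ((k.toNat : Nat) : Int) = k := by omega
    rw [pvA_unfold, PySem.List.pyRange_one, List.foldl_map]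
    have hslice : PySem.List.slice nums none (some (k - 1)) = nums.take (k.toNat - 1) := by
      rw [PySem.List.slice_to nums (by omega)]
      congr 1
      omega
    rw [hslice]
    have hM : ((nums.length : Int) - (k - 1)).toNat = nums.length + 1 - k.toNat := by omega
    rw [hM]
    obtain ⟨c, s, heq, -, -, -, -⟩ :=
      pv_A_inv nums k k.toNat hK (by omega) (nums.length + 1 - k.toNat) (by omega)
    rw [heq]


-- B's loop body (the port's lambda, named for the proofs)
def pvStepB (nums : List Int) (k : Int) (st : PySem.Dict Int Int × Int × Int × Int)
    (ix : Int × Int) : PySem.Dict Int Int × Int × Int × Int :=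
  let i := ix.1
  let x := ix.2
  let cx := st.1.getD x 0
  let dups := if cx = 1 then st.2.1 + 1 else st.2.1
  let count := st.1.insert x (cx + 1)
  let s := st.2.2.1 + x
  let rem : PySem.Dict Int Int × Int × Int :=
    if k ≤ i then
      let y := PySem.List.pyGetD nums (i - k) 0
      let cy := count.getD y 0
      (count.insert y (cy - 1), (if cy = 2 then dups - 1 else dups), s - y)
    else (count, dups, s)
  let best := if k - 1 ≤ i ∧ rem.2.1 = 0 then max st.2.2.2 rem.2.2 else st.2.2.2
  (rem.1, rem.2.1, rem.2.2, best)

lemma pvB_unfold (nums : List Int) (k : Int) (h : ¬ (k ≤ 0 ∨ (nums.length : Int) < k)) :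
    maximumSubarraySum_tle_alt nums k =
      ((PySem.List.enumerate nums 0).foldl (pvStepB nums k)
        (PySem.Dict.empty, 0, 0, 0)).2.2.2 := by
  rw [maximumSubarraySum_tle_alt, if_neg h]
  rfl

lemma pv_B_inv (nums : List Int) (k : Int) (K : Nat) (hK : (K : Int) = k) (hK1 : 1 ≤ K) :
    ∀ (m : Nat), m ≤ nums.length →
    ∃ c d s,
      (List.range m).foldl (fun st (t : Nat) =>
          pvStepB nums k st ((t : Int), PySem.List.pyGetD nums (t : Int) 0))
        (PySem.Dict.empty, 0, 0, 0)
      = (c, d, s, pvRef nums K (m + 1 - K))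
      ∧ (∀ v : Int, c.getD v 0 = (((nums.take m).drop (m - K)).count v : Int))
      ∧ d = ((PySem.List.dedup (nums.take m)).countP
               (fun v => decide (2 ≤ ((nums.take m).drop (m - K)).count v)) : Int)
      ∧ s = ((nums.take m).drop (m - K)).sum := by
  intro m
  induction m with
  | zero =>
    intro _
    refine ⟨PySem.Dict.empty, 0, 0, ?_, ?_, ?_, ?_⟩
    · have h0 : 0 + 1 - K = 0 := by omega
      rw [h0]; simp [pvRef]
    · intro v; simp [PySem.Dict.getD_empty]
    · simp
    · simp
  | succ m ih =>
    intro hm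
    obtain ⟨c, d, s, heq, hcnt, hd, hsum⟩ := ih (by omega)
    have hmn : m < nums.length := by omega
    set x : Int := nums[m]'hmn with hxdef
    set wB : List Int := (nums.take m).drop (m - K) with hwB
    set w1 : List Int := wB ++ [x] with hw1
    set w2 : List Int := (nums.take (m + 1)).drop (m + 1 - K) with hw2
    set S : List Int := PySem.List.dedup (nums.take m) with hS
    set S' : List Int := PySem.List.dedup (nums.take (m + 1)) with hS'
    have htake : nums.take (m + 1) = nums.take m ++ [x] := by
      rw [List.take_succ]
      congr 1
      rw [List.getElem?_eq_getElem hmn]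
      rfl
    have hxm : PySem.List.pyGetD nums ((m : Nat) : Int) 0 = x := by
      rw [PySem.List.pyGetD_natCast, List.getD_eq_getElem _ _ hmn]
    have hndS : S.Nodup := PySem.List.nodup_dedup _
    have hndS' : S'.Nodup := PySem.List.nodup_dedup _
    -- count of v in w1
    have hcw1 : ∀ v : Int, (w1.count v : Int) = (wB.count v : Int) + (if v = x then 1 else 0) := by
      intro v
      by_cases hvx : v = x <;> simp [hw1, List.count_append, hvx, eq_comm]
    -- counter after the insert
    have hc1 : ∀ v : Int, (c.insert x (c.getD x 0 + 1)).getD v 0 = (w1.count v : Int) := by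
      intro v
      rw [PySem.Dict.getD_insert, hcw1 v]
      by_cases hvx : v = x <;> simp [hvx, hcnt]
    -- the dups counter after the increment
    have hoff1 : ∀ z ∈ S, z ≠ x →
        (decide (2 ≤ wB.count z)) = (decide (2 ≤ w1.count z)) := by
      intro z _ hzx
      have := hcw1 z
      rw [if_neg hzx] at this
      have : w1.count z = wB.count z := by omega
      rw [this]
    have hd1 : (if c.getD x 0 = 1 then d + 1 else d)
        = (S'.countP (fun v => decide (2 ≤ w1.count v)) : Int) := by
      have hS'eq : S' = if x ∈ nums.take m then S else S ++ [x] := by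
        rw [hS', htake, pvDedup_append]
      by_cases hxS : x ∈ nums.take m
      · have hxS2 : x ∈ S := by rw [hS, PySem.List.mem_dedup]; exact hxS
        rw [hS'eq, if_pos hxS]
        have hupd := pvCountP_update hndS hxS2
          (fun v => decide (2 ≤ wB.count v)) (fun v => decide (2 ≤ w1.count v)) hoff1
        simp only [decide_eq_true_eq] at hupd
        have hw1x : w1.count x = wB.count x + 1 := by
          have := hcw1 x; rw [if_pos rfl] at this; omega
        rw [hcnt x, hd]
        rcases Nat.lt_or_ge (wB.count x) 2 with h2 | h2
        · by_cases hb : wB.count x = 1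
          · rw [if_pos (show ((wB.count x : Nat) : Int) = 1 by omega)]
            rw [if_neg (show ¬ 2 ≤ wB.count x by omega),
                if_pos (show 2 ≤ w1.count x by omega)] at hupd
            omega
          · rw [if_neg (show ¬ ((wB.count x : Nat) : Int) = 1 by omega)]
            rw [if_neg (show ¬ 2 ≤ wB.count x by omega),
                if_neg (show ¬ 2 ≤ w1.count x by omega)] at hupd
            omega
        · rw [if_neg (show ¬ ((wB.count x : Nat) : Int) = 1 by omega)]
          rw [if_pos (show 2 ≤ wB.count x by omega),
              if_pos (show 2 ≤ w1.count x by omega)] at hupd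
          omega
      · have hxS2 : x ∉ S := by rw [hS, PySem.List.mem_dedup]; exact hxS
        have hxwB : x ∉ wB := fun hx => hxS (List.mem_of_mem_drop hx)
        have hcx0 : wB.count x = 0 := List.count_eq_zero.mpr hxwB
        have hw1x : w1.count x = 1 := by
          have := hcw1 x; rw [if_pos rfl] at this; omega
        rw [hS'eq, if_neg hxS, List.countP_append]
        have h1 : List.countP (fun v => decide (2 ≤ w1.count v)) [x] = 0 := by
          simp [hw1x]
        have h2 : S.countP (fun v => decide (2 ≤ w1.count v))
            = S.countP (fun v => decide (2 ≤ wB.count v)) := by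
          refine List.countP_congr ?_
          intro z hz
          rw [hoff1 z hz (fun hzx => hxS2 (hzx ▸ hz))]
        rw [h1, h2, if_neg (show ¬ c.getD x 0 = 1 by rw [hcnt x, hcx0]; norm_num), hd]
        push_cast
        ring
    -- membership of w2 elements in the prefix
    have hw2sub : ∀ v ∈ w2, v ∈ S' := by
      intro v hv
      rw [hS', PySem.List.mem_dedup]
      exact List.mem_of_mem_drop hv
    by_cases hKm : K ≤ m
    · -- removal happens: w1 = y :: w2
      have hmKn2 : m - K < nums.length := by omega
      set y : Int := nums[m - K]'hmKn2 with hydef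
      have hym : PySem.List.pyGetD nums ((m : Nat) - k) 0 = y := by
        have h1 : ((m : Nat) : Int) - k = ((m - K : Nat) : Int) := by omega
        rw [h1, PySem.List.pyGetD_natCast, List.getD_eq_getElem _ _ hmKn2]
      have hmKt : m - K < (nums.take m).length := by
        rw [List.length_take]; omega
      have hgt : (nums.take m)[m - K]'hmKt = y := List.getElem_take
      have hsplitB : w1 = y :: w2 := by
        rw [hw1, hwB, List.drop_eq_getElem_cons hmKt, hgt, hw2, htake, List.drop_append]
        have h1 : m + 1 - K - (nums.take m).length = 0 := by rw [List.length_take]; omega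
        have h2 : m - K + 1 = m + 1 - K := by omega
        rw [h1, h2]
        simp
      have hcw2 : ∀ v : Int, (w1.count v : Int) = (w2.count v : Int) + (if v = y then 1 else 0) := by
        intro v
        by_cases hvy : v = y <;> simp [hsplitB, hvy, eq_comm]
      have hoff2 : ∀ z ∈ S', z ≠ y →
          (decide (2 ≤ w1.count z)) = (decide (2 ≤ w2.count z)) := by
        intro z _ hzy
        have := hcw2 z
        rw [if_neg hzy] at this
        have : w1.count z = w2.count z := by omega
        rw [this]
      have hyS' : y ∈ S' := by
        rw [hS', PySem.List.mem_dedup, htake]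
        exact List.mem_append_left _ (List.mem_of_getElem hgt)
      have hyw1 : y ∈ w1 := by rw [hsplitB]; exact List.mem_cons_self
      have hb1 : 1 ≤ w1.count y := List.count_pos_iff.mpr hyw1
      have hbsplit : w1.count y = w2.count y + 1 := by
        have := hcw2 y; rw [if_pos rfl] at this; omega
      have hd2 : (if (w1.count y : Int) = 2
            then (S'.countP (fun v => decide (2 ≤ w1.count v)) : Int) - 1
            else (S'.countP (fun v => decide (2 ≤ w1.count v)) : Int))
          = (S'.countP (fun v => decide (2 ≤ w2.count v)) : Int) := by
        have hupd := pvCountP_update hndS' hyS'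
          (fun v => decide (2 ≤ w1.count v)) (fun v => decide (2 ≤ w2.count v)) hoff2
        simp only [decide_eq_true_eq] at hupd
        rcases Nat.lt_or_ge (w2.count y) 2 with h2 | h2
        · by_cases hb : w2.count y = 1
          · rw [if_pos (show ((w1.count y : Nat) : Int) = 2 by omega)]
            rw [if_pos (show 2 ≤ w1.count y by omega),
                if_neg (show ¬ 2 ≤ w2.count y by omega)] at hupd
            omega
          · rw [if_neg (show ¬ ((w1.count y : Nat) : Int) = 2 by omega)]
            rw [if_neg (show ¬ 2 ≤ w1.count y by omega),
                if_neg (show ¬ 2 ≤ w2.count y by omega)] at hupd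
            omega
        · rw [if_neg (show ¬ (w1.count y : Int) = 2 by omega)]
          rw [if_pos (show 2 ≤ w1.count y by omega),
              if_pos (show 2 ≤ w2.count y by omega)] at hupd
          omega
      have hc2 : ∀ v : Int,
          ((c.insert x (c.getD x 0 + 1)).insert y
            ((c.insert x (c.getD x 0 + 1)).getD y 0 - 1)).getD v 0 = (w2.count v : Int) := by
        intro v
        rw [PySem.Dict.getD_insert]
        by_cases hvy : v = y
        · rw [if_pos hvy, hc1 y, hvy]
          have := hcw2 y; rw [if_pos rfl] at this
          omega
        · rw [if_neg hvy, hc1 v]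
          have := hcw2 v; rw [if_neg hvy] at this
          omega
      have hs2 : s + x - y = w2.sum := by
        have h1 : w1.sum = wB.sum + x := by rw [hw1, List.sum_append]; simp
        have h2 : w1.sum = y + w2.sum := by rw [hsplitB, List.sum_cons]
        omega
      refine ⟨(c.insert x (c.getD x 0 + 1)).insert y ((c.insert x (c.getD x 0 + 1)).getD y 0 - 1),
        (if (c.insert x (c.getD x 0 + 1)).getD y 0 = 2
          then (if c.getD x 0 = 1 then d + 1 else d) - 1
          else (if c.getD x 0 = 1 then d + 1 else d)),
        s + x - y, ?_, hc2, by rw [hc1 y, hd1]; exact hd2, hs2⟩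
      rw [List.range_succ, List.foldl_append, heq]
      simp only [List.foldl_cons, List.foldl_nil]
      simp only [pvStepB, hxm, hym]
      rw [if_pos (show k ≤ ((m : Nat) : Int) by omega)]
      refine congrArg (Prod.mk _) (congrArg (Prod.mk _) (congrArg (Prod.mk _) ?_))
      · -- the best component
        rw [hc1 y, hd1]
        have hcond : k - 1 ≤ ((m : Nat) : Int) := by omega
        have hrefs : m + 1 + 1 - K = (m + 1 - K) + 1 := by omega
        have hwin : pvWin nums K (m + 1 - K) = w2 := by
          rw [pvWin, hw2, List.drop_take]
          congr 1
          omega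
        rw [hrefs, pvRef_succ, hwin]
        have hzero : ((if (w1.count y : Int) = 2
              then (S'.countP (fun v => decide (2 ≤ w1.count v)) : Int) - 1
              else (S'.countP (fun v => decide (2 ≤ w1.count v)) : Int)) = 0)
            ↔ w2.Nodup := by
          rw [hd2]
          rw [show ((S'.countP (fun v => decide (2 ≤ w2.count v)) : Int) = 0
              ↔ S'.countP (fun v => decide (2 ≤ w2.count v)) = 0) from by push_cast; omega]
          exact pvCountP_zero hw2sub
        by_cases hN : w2.Nodup
        · rw [if_pos ⟨hcond, hzero.mpr hN⟩, if_pos hN, hs2]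
        · rw [if_neg (fun h => hN (hzero.mp h.2)), if_neg hN]
    · -- no removal: the new window is w1 itself
      have hw2w1 : w2 = w1 := by
        rw [hw2, htake, hw1, hwB]
        have h1 : m + 1 - K = 0 := by omega
        have h2 : m - K = 0 := by omega
        rw [h1, h2]
        simp
      have hs1 : s + x = w1.sum := by
        rw [hw1, List.sum_append, hsum]; simp
      refine ⟨c.insert x (c.getD x 0 + 1), (if c.getD x 0 = 1 then d + 1 else d),
        s + x, ?_, fun v => by rw [hw2w1]; exact hc1 v, by rw [hd1, hw2w1], by rw [hs1, hw2w1]⟩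
      rw [List.range_succ, List.foldl_append, heq]
      simp only [List.foldl_cons, List.foldl_nil]
      simp only [pvStepB, hxm]
      rw [if_neg (show ¬ k ≤ ((m : Nat) : Int) by omega)]
      refine congrArg (Prod.mk _) (congrArg (Prod.mk _) (congrArg (Prod.mk _) ?_))
      · rw [hd1]
        by_cases hKm1 : K ≤ m + 1
        · have hcond : k - 1 ≤ ((m : Nat) : Int) := by omega
          have hrefs : m + 1 + 1 - K = (m + 1 - K) + 1 := by omega
          have hwin : pvWin nums K (m + 1 - K) = w2 := by
            rw [pvWin, hw2, List.drop_take]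
            congr 1
            omega
          rw [hrefs, pvRef_succ, hwin]
          have hzero : ((S'.countP (fun v => decide (2 ≤ w1.count v)) : Int) = 0)
              ↔ w2.Nodup := by
            rw [show ((S'.countP (fun v => decide (2 ≤ w1.count v)) : Int) = 0
                ↔ S'.countP (fun v => decide (2 ≤ w1.count v)) = 0) from by push_cast; omega]
            rw [hw2w1]
            exact pvCountP_zero (by rw [← hw2w1]; exact hw2sub)
          by_cases hN : w2.Nodup
          · rw [if_pos ⟨hcond, hzero.mpr hN⟩, if_pos hN, hs1, hw2w1]
          · rw [if_neg (fun h => hN (hzero.mp h.2)), if_neg hN]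
        · have h1 : m + 1 - K = 0 := by omega
          have h2 : m + 1 + 1 - K = 0 := by omega
          rw [if_neg (show ¬ (k - 1 ≤ ((m : Nat) : Int) ∧
              (S'.countP (fun v => decide (2 ≤ w1.count v)) : Int) = 0) from
            fun h => by have := h.1; omega)]
          rw [h1, h2]

theorem pv_B_eval (nums : List Int) (k : Int) (hk : 1 ≤ k) :
    maximumSubarraySum_tle_alt nums k = pvRef nums k.toNat (nums.length + 1 - k.toNat) := by
  by_cases hkn : (nums.length : Int) < k
  · rw [maximumSubarraySum_tle_alt, if_pos (Or.inr hkn)]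
    have h0 : nums.length + 1 - k.toNat = 0 := by omega
    rw [h0]
    simp [pvRef]
  · have hK : ((k.toNat : Nat) : Int) = k := by omega
    rw [pvB_unfold nums k (by omega)]
    rw [PySem.List.enumerate_eq_map_pyRange nums 0]
    have hlen : PySem.List.len nums = (nums.length : Int) := by simp
    rw [hlen, PySem.List.pyRange_one]
    have hM : ((nums.length : Int) - 0).toNat = nums.length := by omega
    rw [hM, List.map_map, List.foldl_map]
    have hfun : (List.range nums.length).foldl
        (fun st t => pvStepB nums k st
          (((fun j => (j, PySem.List.pyGetD nums j 0)) ∘ fun t : Nat => (0 : Int) + ↑t) t))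
        (PySem.Dict.empty, 0, 0, 0)
      = (List.range nums.length).foldl
        (fun st (t : Nat) => pvStepB nums k st ((t : Int), PySem.List.pyGetD nums (t : Int) 0))
        (PySem.Dict.empty, 0, 0, 0) := by
      apply PySem.List.foldl_congr_mem
      intro acc t _
      simp
    rw [hfun]
    obtain ⟨c, d, s, heq, -, -, -⟩ :=
      pv_B_inv nums k k.toNat hK (by omega) nums.length (le_refl _)
    rw [heq]

-- ===== VERDICT (by name: the statement is the Claim_ definition above) =====
theorem maximumSubarraySum_tle_spec : Claim_equal_maximumSubarraySum_tle := by
  intro nums k _ hpre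
  unfold Spec_maximumSubarraySum_tle
  rw [pv_A_eval nums k hpre, pv_B_eval nums k hpre]
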